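-- pv_equiv track=rewrite | github.com/springboardmentor13579x-proj/Automated-Podcast-Transcription-and-Topic-Segmentation | PROJECT/src/transcription.py.py | make_paragraphs
-- ===== SOURCE A (Python) =====
-- def make_paragraphs(text, max_len=800):
--     words = text.split()
--     result, chunk = [], []
--     for w in words:
--         chunk.append(w)
--         if len(chunk) >= max_len:
--             result.append(" ".join(chunk))
--             chunk = []
--     if chunk:
--         result.append(" ".join(chunk))
--     return "\n\n".join(result)
-- ===== SOURCE B (Python) =====
-- def make_paragraphs(text, max_len=800):
--     words = text.split()
--     step = max(1, max_len)
--     return "\n\n".join(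
--         " ".join(words[i:i + step]) for i in range(0, len(words), step)
--     )
-- ===== Notes on version B (the rewrite author's own statement) =====
-- stated objective: simpler
-- what changed: Replaces the running chunk accumulator and flush logic with index striding: split once, then join fixed-size slices words[i:i+step] taken at range(0, len(words), step) with step = max(1, max_len).
import Mathlib
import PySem

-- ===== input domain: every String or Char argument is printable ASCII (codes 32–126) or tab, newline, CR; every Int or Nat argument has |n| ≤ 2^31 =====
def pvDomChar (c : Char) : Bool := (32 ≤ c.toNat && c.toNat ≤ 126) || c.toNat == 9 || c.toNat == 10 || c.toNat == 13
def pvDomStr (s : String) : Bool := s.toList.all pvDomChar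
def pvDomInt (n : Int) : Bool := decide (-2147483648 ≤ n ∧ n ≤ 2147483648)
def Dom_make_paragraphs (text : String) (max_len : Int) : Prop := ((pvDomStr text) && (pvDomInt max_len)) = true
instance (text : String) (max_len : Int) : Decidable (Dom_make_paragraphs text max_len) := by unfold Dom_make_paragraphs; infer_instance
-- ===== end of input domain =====

-- B replaces A's running chunk accumulator with index striding over fixed-size slices (objective: simpler).

-- ===== PORT A =====
-- one iteration of A's loop body: append w to the chunk and flush when len(chunk) >= max_len
def mpStep (max_len : Int) (st : List String × List String) (w : String) :
    List String × List String :=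
  let chunk := st.2 ++ [w]
  if max_len ≤ PySem.List.len chunk then
    (st.1 ++ [PySem.Str.join " " chunk], [])
  else
    (st.1, chunk)

def make_paragraphs (text : String) (max_len : Int) : String :=
  let words := PySem.Str.split₀ text
  let st := words.foldl (mpStep max_len) ([], [])
  let result := if st.2 ≠ [] then st.1 ++ [PySem.Str.join " " st.2] else st.1
  PySem.Str.join "\n\n" result

-- ===== PORT B =====
def make_paragraphs_alt (text : String) (max_len : Int) : String :=
  let words := PySem.Str.split₀ text
  let step := max 1 max_len
  PySem.Str.join "\n\n"
    ((PySem.List.pyRange 0 (PySem.List.len words) step).map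
      (fun i => PySem.Str.join " " (PySem.List.slice words (some i) (some (i + step)))))

-- ===== PRECONDITION & SPEC =====
def Spec_make_paragraphs (text : String) (max_len : Int) (out : String) : Prop := out = make_paragraphs_alt text max_len
instance (text : String) (max_len : Int) (out : String) : Decidable (Spec_make_paragraphs text max_len out) := by unfold Spec_make_paragraphs; infer_instance

-- ===== CLAIM (what is proved, stated in full; the proofs are below) =====
def Claim_equal_make_paragraphs : Prop := ∀ (text : String) (max_len : Int), Dom_make_paragraphs text max_len → Spec_make_paragraphs text max_len (make_paragraphs text max_len)

-- ===== LEMMAS AND PROOFS =====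

-- proof-side chunking function both ports are reduced to: greedy chunks of size s (s ≥ 1 in use)
def pyChunks (s : Nat) : List String → List (List String)
  | [] => []
  | w :: t => (w :: t.take (s - 1)) :: pyChunks s (t.drop (s - 1))
  termination_by l => l.length
  decreasing_by simp

theorem pyChunks_nil (s : Nat) : pyChunks s [] = [] := by rw [pyChunks.eq_def]

theorem pyChunks_cons (s : Nat) (w : String) (t : List String) :
    pyChunks s (w :: t) = (w :: t.take (s - 1)) :: pyChunks s (t.drop (s - 1)) := by
  rw [pyChunks.eq_def]

-- A's fold advances through one whole chunk: c is the open chunk, t words are still missing from it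
-- (M stands for max 1 max_len; h3 captures exactly what the flush test needs)
theorem mpFold_adv (max_len M : Int) (h2 : max_len ≤ M) (h3 : M = 1 ∨ M = max_len) :
    ∀ (ws : List String) (t : Nat) (acc c : List String), 0 < t →
      (c.length : Int) + t = M →
      ws.foldl (mpStep max_len) (acc, c) =
        if t ≤ ws.length then
          (ws.drop t).foldl (mpStep max_len)
            (acc ++ [PySem.Str.join " " (c ++ ws.take t)], [])
        else (acc, c ++ ws) := by
  intro ws
  induction ws with
  | nil =>
    intro t acc c ht _
    rw [List.foldl_nil, if_neg (by simp only [List.length_nil]; omega)]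
    simp
  | cons w ws ih =>
    intro t acc c ht hlen
    have hstep : List.foldl (mpStep max_len) (acc, c) (w :: ws)
        = List.foldl (mpStep max_len) (mpStep max_len (acc, c) w) ws := rfl
    rw [hstep]
    by_cases h1 : t = 1
    · subst h1
      have hcond : max_len ≤ PySem.List.len ((acc, c).2 ++ [w]) := by
        simp [PySem.List.len_eq]; omega
      have hone : mpStep max_len (acc, c) w = (acc ++ [PySem.Str.join " " (c ++ [w])], []) := by
        simp only [mpStep, if_pos hcond]
      rw [hone]
      simp
    · obtain ⟨t', rfl⟩ : ∃ t', t = t' + 1 + 1 := ⟨t - 2, by omega⟩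
      have hcond : ¬ max_len ≤ PySem.List.len ((acc, c).2 ++ [w]) := by
        simp [PySem.List.len_eq]
        rcases h3 with h3 | h3 <;> omega
      have hkeep : mpStep max_len (acc, c) w = (acc, c ++ [w]) := by
        simp only [mpStep, if_neg hcond]
      rw [hkeep]
      rw [ih (t' + 1) acc (c ++ [w]) (by omega) (by simp; omega)]
      by_cases hle : t' + 1 ≤ ws.length
      · have hle' : t' + 1 + 1 ≤ (w :: ws).length := by simp; omega
        simp only [hle, if_pos, hle', List.drop_succ_cons, List.take_succ_cons,
          List.append_assoc, List.cons_append, List.nil_append]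
      · have hle' : ¬ t' + 1 + 1 ≤ (w :: ws).length := by simp at hle ⊢; omega
        rw [if_neg hle, if_neg hle']
        simp

-- A's finalized fold result is the greedy chunking
theorem mpFold_chunks (max_len M : Int) (h1 : 1 ≤ M) (h2 : max_len ≤ M)
    (h3 : M = 1 ∨ M = max_len) :
    ∀ (n : Nat) (ws : List String), ws.length ≤ n → ∀ (acc : List String),
      (let st := ws.foldl (mpStep max_len) (acc, []);
        if st.2 ≠ [] then st.1 ++ [PySem.Str.join " " st.2] else st.1)
      = acc ++ (pyChunks M.toNat ws).map (PySem.Str.join " ") := by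
  intro n
  induction n with
  | zero =>
    intro ws hws acc
    have hnil : ws = [] := by cases ws <;> simp_all
    subst hnil
    simp [pyChunks_nil]
  | succ n ih =>
    intro ws hws acc
    cases ws with
    | nil => simp [pyChunks_nil]
    | cons w t =>
      obtain ⟨s, hsM⟩ : ∃ s : Nat, (s : Int) = M := ⟨M.toNat, by omega⟩
      have hsn : M.toNat = s := by omega
      rw [hsn]
      have hs1 : 1 ≤ s := by omega
      have hrun := mpFold_adv max_len M h2 h3 (w :: t) s acc [] (by omega) (by simp; omega)
      simp only [List.length_cons] at hws
      by_cases hle : s ≤ (w :: t).length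
      · rw [hrun, if_pos hle]
        simp only [List.length_cons] at hle
        have hdroplen : ((w :: t).drop s).length ≤ n := by
          simp only [List.length_drop, List.length_cons]; omega
        have hind := ih ((w :: t).drop s) hdroplen
          (acc ++ [PySem.Str.join " " ([] ++ (w :: t).take s)])
        rw [hsn] at hind
        simp only at hind
        rw [hind]
        rw [pyChunks_cons]
        have htake : (w :: t).take s = w :: t.take (s - 1) := by
          obtain ⟨s', rfl⟩ : ∃ s', s = s' + 1 := ⟨s - 1, by omega⟩
          simp
        have hdrop : (w :: t).drop s = t.drop (s - 1) := by
          obtain ⟨s', rfl⟩ : ∃ s', s = s' + 1 := ⟨s - 1, by omega⟩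
          simp
        rw [htake, hdrop]
        simp
      · rw [hrun, if_neg hle]
        simp only [List.length_cons] at hle
        simp only [List.nil_append]
        have hne : (w :: t) ≠ [] := by simp
        simp only [hne, ne_eq, not_false_iff, if_pos]
        have htt : t.take (s - 1) = t := List.take_of_length_le (by omega)
        have htd : t.drop (s - 1) = [] := List.drop_eq_nil_of_le (by omega)
        rw [pyChunks_cons, htt, htd]
        simp [pyChunks_nil]

-- B's strided slices are the greedy chunking
theorem sliceMap_chunks (M : Int) (h1 : 1 ≤ M) :
    ∀ (n : Nat) (ws : List String), ws.length ≤ n →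
      (PySem.List.pyRange 0 (PySem.List.len ws) M).map
          (fun i => PySem.List.slice ws (some i) (some (i + M)))
        = pyChunks M.toNat ws := by
  intro n
  induction n with
  | zero =>
    intro ws hws
    have hnil : ws = [] := by cases ws <;> simp_all
    subst hnil
    simp [pyChunks_nil, PySem.List.len_eq,
      PySem.List.pyRange_of_pos 0 0 (by omega : (0:Int) < M)]
  | succ n ih =>
    intro ws hws
    cases ws with
    | nil =>
      simp [pyChunks_nil, PySem.List.len_eq,
        PySem.List.pyRange_of_pos 0 0 (by omega : (0:Int) < M)]
    | cons w t =>
      obtain ⟨s, hsM⟩ : ∃ s : Nat, (s : Int) = M := ⟨M.toNat, by omega⟩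
      have hsn : M.toNat = s := by omega
      rw [hsn]
      have hs1 : 1 ≤ s := by omega
      have hLval : PySem.List.len (w :: t) = (t.length : Int) + 1 := by
        simp [PySem.List.len_eq]
      rw [hLval]
      simp only [List.length_cons] at hws
      generalize hLg : (t.length : Int) + 1 = L
      have hLpos : 0 < L := by omega
      have hcnt : ((L - 0 + M - 1) / M).toNat = (((L - M) - 0 + M - 1) / M).toNat + 1 := by
        have hdiv : (L - 0 + M - 1) / M = ((L - M) - 0 + M - 1) / M + 1 := by
          have he : L - 0 + M - 1 = ((L - M) - 0 + M - 1) + 1 * M := by ring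
          rw [he, Int.add_mul_ediv_right _ _ (by omega : M ≠ 0)]
        have hnn : 0 ≤ ((L - M) - 0 + M - 1) / M := by
          apply Int.ediv_nonneg <;> omega
        omega
      have hrange : PySem.List.pyRange 0 L M
          = 0 :: (PySem.List.pyRange 0 (L - M) M).map (· + M) := by
        rw [PySem.List.pyRange_of_pos 0 L (by omega), PySem.List.pyRange_of_pos 0 (L - M) (by omega)]
        by_cases hLM : 0 < L - M
        · rw [if_pos hLpos, if_pos hLM]
          rw [hcnt, List.range_succ_eq_map]
          simp only [List.map_cons, List.map_map]
          congr 1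
          · push_cast; ring
          · apply List.map_congr_left
            intro k _
            simp only [Function.comp]
            push_cast
            ring
        · have hcnt0 : (((L - M) - 0 + M - 1) / M).toNat = 0 := by
            have hlt : ((L - M) - 0 + M - 1) / M < 1 := by
              apply Int.ediv_lt_of_lt_mul (by omega)
              omega
            omega
          rw [if_pos hLpos, if_neg hLM]
          rw [hcnt, hcnt0]
          simp
      rw [hrange]
      simp only [List.map_cons, List.map_map]
      have hhead : PySem.List.slice (w :: t) (some 0) (some (0 + M)) = w :: t.take (s - 1) := by
        rw [PySem.List.slice_toNat _ (by omega) (by omega)]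
        have e1 : Int.toNat 0 = 0 := rfl
        have e2 : (0 + M).toNat - Int.toNat 0 = s := by omega
        rw [e2, e1, List.drop_zero]
        obtain ⟨s', rfl⟩ : ∃ s', s = s' + 1 := ⟨s - 1, by omega⟩
        simp
      rw [hhead]
      have htailrange : PySem.List.pyRange 0 (L - M) M
          = PySem.List.pyRange 0 (PySem.List.len (t.drop (s - 1))) M := by
        have hlen : PySem.List.len (t.drop (s - 1)) = max (L - M) 0 := by
          simp only [PySem.List.len_eq, List.length_drop]
          rcases le_total (L - M) 0 with hc | hc
          · rw [max_eq_right hc]; omega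
          · rw [max_eq_left hc]; omega
        by_cases hLM : 0 < L - M
        · rw [hlen, max_eq_left (by omega)]
        · rw [hlen, max_eq_right (by omega)]
          rw [PySem.List.pyRange_of_pos 0 (L - M) (by omega),
            PySem.List.pyRange_of_pos 0 0 (by omega)]
          rw [if_neg hLM, if_neg (by omega : ¬ (0:Int) < 0)]
      have hshift : ∀ i ∈ PySem.List.pyRange 0 (L - M) M,
          PySem.List.slice (w :: t) (some (i + M)) (some (i + M + M))
            = PySem.List.slice (t.drop (s - 1)) (some i) (some (i + M)) := by
        intro i hi
        have hi0 : 0 ≤ i := by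
          rw [PySem.List.pyRange_of_pos 0 (L - M) (by omega)] at hi
          simp at hi
          obtain ⟨k, _, rfl⟩ := hi
          positivity
        rw [PySem.List.slice_toNat _ (by omega) (by omega),
          PySem.List.slice_toNat _ (by omega) (by omega)]
        have e1 : (i + M).toNat = i.toNat + s := by omega
        have e2 : (i + M + M).toNat - (i + M).toNat = s := by omega
        have e3 : (i + M).toNat - i.toNat = s := by omega
        rw [e2, e3, e1]
        rw [List.drop_drop]
        have e4 : i.toNat + s = (s - 1) + (i.toNat + 1) := by omega
        have e5 : (s - 1) + (i.toNat + 1) = ((s - 1) + i.toNat) + 1 := by omega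
        rw [e4, e5, List.drop_succ_cons]
      calc ((w :: t.take (s - 1)) ::
              (PySem.List.pyRange 0 (L - M) M).map
                (fun i => PySem.List.slice (w :: t) (some (i + M)) (some (i + M + M))))
          = (w :: t.take (s - 1)) ::
              (PySem.List.pyRange 0 (L - M) M).map
                (fun i => PySem.List.slice (t.drop (s - 1)) (some i) (some (i + M))) := by
            congr 1
            exact List.map_congr_left hshift
        _ = (w :: t.take (s - 1)) :: pyChunks s (t.drop (s - 1)) := by
            rw [htailrange]
            have hind := ih (t.drop (s - 1)) (by simp only [List.length_drop]; omega)
            rw [hsn] at hind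
            exact congrArg _ hind
        _ = pyChunks s (w :: t) := by rw [pyChunks_cons]

-- ===== VERDICT (by name: the statement is the Claim_ definition above) =====
theorem make_paragraphs_spec : Claim_equal_make_paragraphs := by
  intro text max_len _
  unfold Spec_make_paragraphs make_paragraphs make_paragraphs_alt
  simp only []
  rw [mpFold_chunks max_len (max 1 max_len) (le_max_left 1 max_len) (le_max_right 1 max_len)
    ((max_choice 1 max_len).imp id id) (PySem.Str.split₀ text).length (PySem.Str.split₀ text)
    le_rfl []]
  rw [← sliceMap_chunks (max 1 max_len) (le_max_left 1 max_len)
    (PySem.Str.split₀ text).length (PySem.Str.split₀ text) le_rfl]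
  simp only [List.map_map]
  rfl
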